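-- pv_equiv track=rewrite | github.com/xterminal86/name-gen | name-gen.py | GetDigraphsDistr
-- ===== SOURCE A (Python) =====
-- def GetDigraphsDistr(lines : list) -> dict:
--   res = {};
--
--   for name in lines:
--     ln = len(name);
--     for i in range(0, ln - 1, 2):
--       fl = name[i];
--       sl = name[i + 1];
--
--       if fl not in res:
--         res[fl] = { sl : 1 };
--       else:
--         if sl not in res[fl]:
--           res[fl][sl] = 1;
--         else:
--           res[fl][sl] += 1;
--
--   return res;
-- ===== SOURCE B (Python) =====
-- def GetDigraphsDistr(lines : list) -> dict:
--   digraphs = [(name[i], name[i + 1]) for name in lines for i in range(0, len(name) - 1, 2)]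
--   cnt = {}
--   for p in digraphs:
--     cnt[p] = cnt.get(p, 0) + 1
--   res = {}
--   for (fl, sl), c in cnt.items():
--     res.setdefault(fl, {})[sl] = c
--   return res
-- ===== Notes on version B (the rewrite author's own statement) =====
-- stated objective: idiomatic
-- what changed: A grows a nested dict-of-dicts incrementally with three membership branches per digraph; B collects all digraphs into one flat list, counts them in a single flat tuple-keyed table, and a separate second pass reshapes that table into the nested result via setdefault.
import Mathlib
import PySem

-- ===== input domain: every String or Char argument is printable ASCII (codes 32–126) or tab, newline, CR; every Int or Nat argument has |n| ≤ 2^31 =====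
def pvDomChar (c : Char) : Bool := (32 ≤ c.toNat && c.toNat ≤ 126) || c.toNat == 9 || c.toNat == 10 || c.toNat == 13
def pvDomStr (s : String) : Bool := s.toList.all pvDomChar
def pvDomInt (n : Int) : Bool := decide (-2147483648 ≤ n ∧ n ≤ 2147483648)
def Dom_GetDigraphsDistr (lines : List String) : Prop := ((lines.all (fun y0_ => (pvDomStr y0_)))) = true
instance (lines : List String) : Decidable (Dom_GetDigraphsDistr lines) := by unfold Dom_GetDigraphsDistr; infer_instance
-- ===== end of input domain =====

-- B replaces A's incrementally-grown nested dict with a flat digraph list counted in one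
-- tuple-keyed table that a second pass reshapes into the nested result (objective: idiomatic).
-- Indexing note: in both ports name[i] is PySem.List.pyGetD on name.toList (i is always in
-- range, since i+1 ≤ len-1 inside range(0, len-1, 2), so Python never raises here) and the
-- one-character Python string becomes String.ofList [c].

-- ===== PORT A =====
def GetDigraphsDistr (lines : List String) : List (String × List (String × Int)) :=
  let res : PySem.Dict String (PySem.Dict String Int) :=
    lines.foldl (fun res name =>
      let ln : Int := PySem.Str.len name
      (PySem.List.pyRange 0 (ln - 1) 2).foldl (fun res i =>
        let fl : String := String.ofList [PySem.List.pyGetD name.toList i ' ']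
        let sl : String := String.ofList [PySem.List.pyGetD name.toList (i + 1) ' ']
        if res.contains fl = false then
          res.insert fl (PySem.Dict.empty.insert sl 1)
        else
          let inner := res.getD fl PySem.Dict.empty
          if inner.contains sl = false then
            res.insert fl (inner.insert sl 1)
          else
            res.insert fl (inner.insert sl (inner.getD sl 0 + 1))) res) PySem.Dict.empty
  res.items.map (fun p => (p.1, p.2.items))

-- ===== PORT B =====
-- B-side helper: the digraph list of one name ([(name[i], name[i+1]) for i in range(0, len(name)-1, 2)])
def pvDig (name : String) : List (String × String) :=
  let ln : Int := PySem.Str.len name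
  (PySem.List.pyRange 0 (ln - 1) 2).map (fun i =>
    (String.ofList [PySem.List.pyGetD name.toList i ' '],
     String.ofList [PySem.List.pyGetD name.toList (i + 1) ' ']))

def GetDigraphsDistr_alt (lines : List String) : List (String × List (String × Int)) :=
  let digraphs : List (String × String) := lines.flatMap pvDig
  let cnt : PySem.Dict (String × String) Int :=
    digraphs.foldl (fun d p => d.insert p (d.getD p 0 + 1)) PySem.Dict.empty
  let res : PySem.Dict String (PySem.Dict String Int) :=
    cnt.items.foldl (fun res p =>
      res.insert p.1.1 ((res.getD p.1.1 PySem.Dict.empty).insert p.1.2 p.2)) PySem.Dict.empty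
  res.items.map (fun p => (p.1, p.2.items))

-- ===== PRECONDITION & SPEC =====
def Spec_GetDigraphsDistr (lines : List String) (out : List (String × List (String × Int))) : Prop := out = GetDigraphsDistr_alt lines
instance (lines : List String) (out : List (String × List (String × Int))) : Decidable (Spec_GetDigraphsDistr lines out) := by unfold Spec_GetDigraphsDistr; infer_instance

-- ===== CLAIM (what is proved, stated in full; the proofs are below) =====
def Claim_equal_GetDigraphsDistr : Prop := ∀ (lines : List String), Dom_GetDigraphsDistr lines → Spec_GetDigraphsDistr lines (GetDigraphsDistr lines)

-- ===== LEMMAS AND PROOFS =====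

-- the uniform per-digraph update A performs on the nested dict
def pvStepA (res : PySem.Dict String (PySem.Dict String Int)) (q : String × String) :
    PySem.Dict String (PySem.Dict String Int) :=
  res.insert q.1 ((res.getD q.1 PySem.Dict.empty).insert q.2
    ((res.getD q.1 PySem.Dict.empty).getD q.2 0 + 1))

-- the per-(digraph, count) update B's reshape pass performs
def pvStepB (res : PySem.Dict String (PySem.Dict String Int)) (p : (String × String) × Int) :
    PySem.Dict String (PySem.Dict String Int) :=
  res.insert p.1.1 ((res.getD p.1.1 PySem.Dict.empty).insert p.1.2 p.2)

-- A's three branches collapse to pvStepA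
theorem pvStepA_eq (res : PySem.Dict String (PySem.Dict String Int)) (fl sl : String) :
    (if res.contains fl = false then
      res.insert fl (PySem.Dict.empty.insert sl 1)
    else
      let inner := res.getD fl PySem.Dict.empty
      if inner.contains sl = false then
        res.insert fl (inner.insert sl 1)
      else
        res.insert fl (inner.insert sl (inner.getD sl 0 + 1))) = pvStepA res (fl, sl) := by
  by_cases hc : res.contains fl = false
  · simp [hc, pvStepA, PySem.Dict.getD_of_not_contains res _ hc]
  · simp only [hc]
    by_cases hs : (res.getD fl PySem.Dict.empty).contains sl = false
    · simp [hs, pvStepA, PySem.Dict.getD_of_not_contains _ _ hs]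
    · simp [hs, pvStepA]

theorem pvA_eq (lines : List String) :
    GetDigraphsDistr lines =
      ((lines.flatMap pvDig).foldl pvStepA PySem.Dict.empty).items.map (fun p => (p.1, p.2.items)) := by
  have h : lines.foldl (fun res name =>
      let ln : Int := PySem.Str.len name
      (PySem.List.pyRange 0 (ln - 1) 2).foldl (fun res i =>
        let fl : String := String.ofList [PySem.List.pyGetD name.toList i ' ']
        let sl : String := String.ofList [PySem.List.pyGetD name.toList (i + 1) ' ']
        if res.contains fl = false then
          res.insert fl (PySem.Dict.empty.insert sl 1)
        else
          let inner := res.getD fl PySem.Dict.empty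
          if inner.contains sl = false then
            res.insert fl (inner.insert sl 1)
          else
            res.insert fl (inner.insert sl (inner.getD sl 0 + 1))) res) PySem.Dict.empty
      = (lines.flatMap pvDig).foldl pvStepA PySem.Dict.empty := by
    rw [List.foldl_flatMap]
    refine List.foldl_ext _ _ _ ?_
    intro res name _
    show _ = (pvDig name).foldl pvStepA res
    simp only [pvDig, List.foldl_map]
    refine List.foldl_ext _ _ _ ?_
    intro r i _
    exact pvStepA_eq r _ _
  exact congrArg (fun d => d.items.map (fun p => (p.1, p.2.items))) h

-- folding B's reshape over pairs that all avoid the flat key (fl, sl) leaves that slot's count alone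
theorem pvAbsent (l : List ((String × String) × Int)) (fl sl : String)
    (h : (fl, sl) ∉ l.map (·.1)) (res : PySem.Dict String (PySem.Dict String Int)) :
    (((l.foldl pvStepB res).getD fl PySem.Dict.empty).getD sl 0) =
      ((res.getD fl PySem.Dict.empty).getD sl 0) := by
  induction l generalizing res with
  | nil => rfl
  | cons p l ih =>
    simp only [List.map_cons, List.mem_cons, not_or] at h
    rw [List.foldl_cons, ih h.2 _]
    by_cases hfl : p.1.1 = fl
    · have hsl : p.1.2 ≠ sl := by
        intro hs; exact h.1 (by rw [← hfl, ← hs])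
      rw [pvStepB, hfl, PySem.Dict.getD_insert_self,
        PySem.Dict.getD_insert_of_ne _ _ _ (Ne.symm hsl)]
    · rw [pvStepB, PySem.Dict.getD_insert_of_ne _ _ _ (Ne.symm hfl)]

-- two inserts at distinct keys commute when the first key is already present (its slot is
-- overwritten in place, so insertion order of the other key is unaffected)
theorem pvInsert_comm {ν : Type} (d : PySem.Dict String ν) (k k' : String) (v v' : ν)
    (hne : k ≠ k') (hc : d.contains k = true) :
    (d.insert k v).insert k' v' = (d.insert k' v').insert k v := by
  have hbne : (k' == k) = false := by simp [Ne.symm hne]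
  have hbne' : (k == k') = false := by simp [hne]
  by_cases hc' : d.contains k' = true
  · have h1 : (d.insert k v).contains k' = true := by
      rw [PySem.Dict.contains_insert, hc', Bool.or_true]
    have h2 : (d.insert k' v').contains k = true := by
      rw [PySem.Dict.contains_insert, hc, Bool.or_true]
    apply PySem.Dict.ext
    rw [PySem.Dict.items_insert_of_contains _ _ h1, PySem.Dict.items_insert_of_contains _ _ hc,
      PySem.Dict.items_insert_of_contains _ _ h2, PySem.Dict.items_insert_of_contains _ _ hc',
      List.map_map, List.map_map]
    apply List.map_congr_left
    intro p _
    simp only [Function.comp_apply]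
    by_cases hk : p.1 = k
    · simp [hk, hbne']
    · by_cases hk' : p.1 = k' <;> simp [hk, hk', hbne]
  · have hcf : d.contains k' = false := by simpa using hc'
    have h1 : (d.insert k v).contains k' = false := by
      rw [PySem.Dict.contains_insert, hcf, hbne, Bool.or_false]
    have h2 : (d.insert k' v').contains k = true := by
      rw [PySem.Dict.contains_insert, hc, Bool.or_true]
    apply PySem.Dict.ext
    rw [PySem.Dict.items_insert_of_not_contains _ _ h1, PySem.Dict.items_insert_of_contains _ _ hc,
      PySem.Dict.items_insert_of_contains _ _ h2, PySem.Dict.items_insert_of_not_contains _ _ hcf,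
      List.map_append]
    simp [Ne.symm hne]

-- rewriting the (fl, sl) count commutes with reshaping pairs that avoid (fl, sl)
theorem pvUpdate_comm (l : List ((String × String) × Int)) (fl sl : String) (w : Int)
    (res : PySem.Dict String (PySem.Dict String Int))
    (h : (fl, sl) ∉ l.map (·.1)) (hfl : res.contains fl = true)
    (hsl : (res.getD fl PySem.Dict.empty).contains sl = true) :
    l.foldl pvStepB (res.insert fl ((res.getD fl PySem.Dict.empty).insert sl w)) =
      (l.foldl pvStepB res).insert fl
        (((l.foldl pvStepB res).getD fl PySem.Dict.empty).insert sl w) := by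
  induction l generalizing res with
  | nil => rfl
  | cons p l ih =>
    simp only [List.map_cons, List.mem_cons, not_or] at h
    have hfl' : (pvStepB res p).contains fl = true := by
      rw [pvStepB, PySem.Dict.contains_insert, hfl, Bool.or_true]
    have hsl' : ((pvStepB res p).getD fl PySem.Dict.empty).contains sl = true := by
      by_cases hk : p.1.1 = fl
      · rw [pvStepB, hk, PySem.Dict.getD_insert_self, PySem.Dict.contains_insert, hsl,
          Bool.or_true]
      · rw [pvStepB, PySem.Dict.getD_insert_of_ne _ _ _ (Ne.symm hk)]; exact hsl
    have hcomm : pvStepB (res.insert fl ((res.getD fl PySem.Dict.empty).insert sl w)) p =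
        (pvStepB res p).insert fl
          (((pvStepB res p).getD fl PySem.Dict.empty).insert sl w) := by
      by_cases hk : p.1.1 = fl
      · have hs : p.1.2 ≠ sl := fun hs => h.1 (by rw [← hk, ← hs])
        simp only [pvStepB, hk, PySem.Dict.getD_insert_self,
          PySem.Dict.insert_insert_self]
        rw [pvInsert_comm _ sl p.1.2 _ _ (Ne.symm hs) hsl]
      · simp only [pvStepB, PySem.Dict.getD_insert_of_ne _ _ _ (Ne.symm hk),
          PySem.Dict.getD_insert_of_ne _ _ _ hk]
        rw [pvInsert_comm _ fl p.1.1 _ _ (fun hq => hk hq.symm) hfl]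
    rw [List.foldl_cons, List.foldl_cons, hcomm, ih _ h.2 hfl' hsl']

-- one more counted occurrence of q in the flat table is one pvStepA on the reshaped dict
theorem pvCrux (d : PySem.Dict (String × String) Int) (q : String × String)
    (hnd : d.keys.Nodup) :
    ((d.insert q (d.getD q 0 + 1)).items.foldl pvStepB PySem.Dict.empty) =
      pvStepA (d.items.foldl pvStepB PySem.Dict.empty) q := by
  obtain ⟨fl, sl⟩ := q
  by_cases hc : d.contains (fl, sl) = true
  · -- the digraph is already counted: its stored count w becomes w + 1 in place
    have hmemk : (fl, sl) ∈ d.items.map (·.1) := by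
      have := (PySem.Dict.contains_iff_mem_keys d ((fl, sl))).mp hc
      simpa [PySem.Dict.keys] using this
    obtain ⟨p, hpmem, hp1⟩ := List.mem_map.mp hmemk
    obtain ⟨l₁, l₂, hitems⟩ := List.append_of_mem hpmem
    obtain ⟨q', w⟩ := p
    cases hp1
    have hndk : (d.items.map (·.1)).Nodup := by
      simpa [PySem.Dict.keys] using hnd
    rw [hitems] at hndk
    simp only [List.map_append, List.map_cons, List.nodup_append, List.nodup_cons, List.mem_cons] at hndk
    have hq1 : (fl, sl) ∉ l₁.map (·.1) := by
      intro hm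
      exact hndk.2.2 _ hm (fl, sl) (Or.inl rfl) rfl
    have hq2 : (fl, sl) ∉ l₂.map (·.1) := hndk.2.1.1
    have hw : d.getD (fl, sl) 0 = w :=
      PySem.Dict.getD_of_mem_items d (by rw [hitems]; simp) hnd 0
    have hmap : (d.insert (fl, sl) (d.getD (fl, sl) 0 + 1)).items =
        l₁ ++ ((fl, sl), w + 1) :: l₂ := by
      rw [PySem.Dict.items_insert_of_contains _ _ hc, hitems, hw]
      simp only [List.map_append, List.map_cons]
      congr 1
      · refine (List.map_congr_left ?_).trans (List.map_id _)
        intro p hp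
        have : p.1 ≠ (fl, sl) := by
          intro he; exact hq1 (List.mem_map.mpr ⟨p, hp, he⟩)
        simp [this]
      · congr 1
        · simp
        · refine (List.map_congr_left ?_).trans (List.map_id _)
          intro p hp
          have : p.1 ≠ (fl, sl) := by
            intro he; exact hq2 (List.mem_map.mpr ⟨p, hp, he⟩)
          simp [this]
    set M := l₁.foldl pvStepB PySem.Dict.empty with hM
    have hfoldA : d.items.foldl pvStepB PySem.Dict.empty =
        l₂.foldl pvStepB (pvStepB M ((fl, sl), w)) := by
      rw [hitems, List.foldl_append, List.foldl_cons]
    have hcontfl : (pvStepB M ((fl, sl), w)).contains fl = true := by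
      simp [pvStepB]
    have hcontsl : ((pvStepB M ((fl, sl), w)).getD fl PySem.Dict.empty).contains sl = true := by
      simp [pvStepB, PySem.Dict.getD_insert_self]
    have hRI : ((l₂.foldl pvStepB (pvStepB M ((fl, sl), w))).getD fl
        PySem.Dict.empty).getD sl 0 = w := by
      rw [pvAbsent l₂ fl sl hq2]
      simp [pvStepB, PySem.Dict.getD_insert_self]
    rw [hmap, List.foldl_append, List.foldl_cons, ← hM]
    have h1 : pvStepB M ((fl, sl), w + 1) =
        (pvStepB M ((fl, sl), w)).insert fl
          (((pvStepB M ((fl, sl), w)).getD fl PySem.Dict.empty).insert sl (w + 1)) := by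
      simp [pvStepB, PySem.Dict.getD_insert_self, PySem.Dict.insert_insert_self]
    rw [h1, pvUpdate_comm l₂ fl sl (w + 1) _ hq2 hcontfl hcontsl, hfoldA, pvStepA, hRI]
  · -- a fresh digraph: it is appended with count 1
    have hcf : d.contains (fl, sl) = false := by simpa using hc
    have hq : (fl, sl) ∉ d.items.map (·.1) := by
      intro hm
      have : d.contains (fl, sl) = true := by
        apply (PySem.Dict.contains_iff_mem_keys d _).mpr
        simpa [PySem.Dict.keys] using hm
      rw [this] at hcf; simp at hcf
    rw [PySem.Dict.items_insert_of_not_contains _ _ hcf, List.foldl_append, List.foldl_cons,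
      List.foldl_nil, PySem.Dict.getD_of_not_contains _ _ hcf, pvStepA, pvStepB]
    rw [pvAbsent d.items fl sl hq]
    simp [PySem.Dict.getD_empty]

-- MAIN: reshaping the flat counter of ds equals A's incremental nested fold over ds
theorem pvMain (ds : List (String × String)) :
    ((ds.foldl (fun d p => d.insert p (d.getD p 0 + 1)) PySem.Dict.empty).items.foldl
        pvStepB PySem.Dict.empty) = ds.foldl pvStepA PySem.Dict.empty := by
  induction ds using List.reverseRecOn with
  | nil => rfl
  | append_singleton ds q ih =>
    rw [List.foldl_append, List.foldl_append, List.foldl_cons, List.foldl_nil,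
      List.foldl_cons, List.foldl_nil, ← ih]
    apply pvCrux
    rw [PySem.Dict.foldl_insert_getD_add_one_eq_counter]
    exact PySem.Dict.nodup_keys_counter ds

-- ===== VERDICT (by name: the statement is the Claim_ definition above) =====
theorem GetDigraphsDistr_spec : Claim_equal_GetDigraphsDistr := by
  intro lines _
  unfold Spec_GetDigraphsDistr GetDigraphsDistr_alt
  rw [pvA_eq, ← pvMain]
  rfl
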